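-- pv_equiv track=rewrite | github.com/Yash089610/IITD | COL100/Assignment 7/2021EE10638/2021EE10638-q2.py | sortings
-- ===== SOURCE A (Python) =====
-- def sortings(inpt : str):
--     l=[0]*10
--     for i in inpt:
--         if i in "0123456789":
--             l[int(i)]+=1
--     for i in range(9,-1,-1):
--         if l[i]%2==1:
--             inpt=str(i)*l[i]+inpt.replace(str(i),"")
--     return inpt
-- ===== SOURCE B (Python) =====
-- def sortings(inpt: str):
--     cnt = [0] * 10
--     for ch in inpt:
--         if '0' <= ch <= '9':
--             cnt[ord(ch) - 48] += 1
--     odd = {chr(48 + d) for d in range(10) if cnt[d] % 2 == 1}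
--     prefix = ''.join(chr(48 + d) * cnt[d] for d in range(10) if cnt[d] % 2 == 1)
--     tail = ''.join(ch for ch in inpt if ch not in odd)
--     return prefix + tail
-- ===== Notes on version B (the rewrite author's own statement) =====
-- stated objective: simpler
-- what changed: Replaces A's descending loop of 10 string-rebuilding steps (prepend block + str.replace over the whole current string) by a direct two-pass construction: count digits once, emit the odd-count digit blocks in ascending order as a prefix, then keep every non-odd-digit character of the original string in one filter pass.
import Mathlib
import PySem

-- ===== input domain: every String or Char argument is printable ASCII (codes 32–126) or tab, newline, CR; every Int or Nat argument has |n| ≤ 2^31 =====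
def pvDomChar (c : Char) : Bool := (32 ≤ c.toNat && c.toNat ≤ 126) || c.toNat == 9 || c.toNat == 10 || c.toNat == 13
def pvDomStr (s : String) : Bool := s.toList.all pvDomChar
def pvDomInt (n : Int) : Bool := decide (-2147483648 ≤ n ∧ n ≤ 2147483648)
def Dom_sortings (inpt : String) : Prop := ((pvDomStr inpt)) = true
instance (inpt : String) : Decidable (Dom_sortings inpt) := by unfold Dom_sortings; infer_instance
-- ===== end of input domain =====

-- B replaces A's ten string-rebuilding passes (prepend block + replace) by one count pass,
-- a direct ascending prefix of odd-count digit blocks, and one filter pass for the tail (simpler; same result).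

-- ===== PORT A =====
def sortings (inpt : String) : String :=
  let l0 : List Int := List.replicate 10 0
  let l := inpt.toList.foldl (fun l i =>
    if PySem.Chars.isIn [i] "0123456789".toList then
      PySem.List.pySetD l ((PySem.Int.ofChars? [i]).getD 0)
        (PySem.List.pyGetD l ((PySem.Int.ofChars? [i]).getD 0) 0 + 1)
    else l) l0
  let res := (PySem.List.pyRange 9 (-1) (-1)).foldl (fun s i =>
    if PySem.Int.mod (PySem.List.pyGetD l i 0) 2 == 1 then
      PySem.List.pyRepeat (PySem.Int.toChars i) (PySem.List.pyGetD l i 0)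
        ++ PySem.Chars.replace s (PySem.Int.toChars i) []
    else s) inpt.toList
  String.ofList res

-- ===== PORT B =====
def sortings_alt (inpt : String) : String :=
  let cnt := inpt.toList.foldl (fun cnt ch =>
    if decide ('0' ≤ ch ∧ ch ≤ '9') then
      PySem.List.pySetD cnt ((ch.toNat : Int) - 48)
        (PySem.List.pyGetD cnt ((ch.toNat : Int) - 48) 0 + 1)
    else cnt) (List.replicate 10 (0 : Int))
  let odd : PySem.Set Char := PySem.Set.ofList
    (((PySem.List.pyRange 0 10 1).filter
        (fun d => PySem.Int.mod (PySem.List.pyGetD cnt d 0) 2 == 1)).map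
      (fun d => Char.ofNat (48 + d).toNat))
  let pre := PySem.Chars.join []
    (((PySem.List.pyRange 0 10 1).filter
        (fun d => PySem.Int.mod (PySem.List.pyGetD cnt d 0) 2 == 1)).map
      (fun d => PySem.List.pyRepeat [Char.ofNat (48 + d).toNat] (PySem.List.pyGetD cnt d 0)))
  let tail := inpt.toList.filter (fun ch => !(PySem.Set.contains odd ch))
  String.ofList (pre ++ tail)

-- ===== PRECONDITION & SPEC =====
def Spec_sortings (inpt : String) (out : String) : Prop := out = sortings_alt inpt
instance (inpt : String) (out : String) : Decidable (Spec_sortings inpt out) := by unfold Spec_sortings; infer_instance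

-- ===== CLAIM (what is proved, stated in full; the proofs are below) =====
def Claim_equal_sortings : Prop := ∀ (inpt : String), Dom_sortings inpt → Spec_sortings inpt (sortings inpt)

-- ===== LEMMAS AND PROOFS =====

-- canonical digit vocabulary used only by the proofs
def dList : List Char := ['0', '1', '2', '3', '4', '5', '6', '7', '8', '9']
def dChar (d : Nat) : Char := dList.getD d '0'
def cntF (cs : List Char) (d : Nat) : Nat := cs.count (dChar d)
def cntStep (l : List Int) (c : Char) : List Int :=
  if c ∈ dList then
    PySem.List.pySetD l ((c.toNat : Int) - 48) (PySem.List.pyGetD l ((c.toNat : Int) - 48) 0 + 1)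
  else l
def stepA (cnt : Nat → Nat) (s : List Char) (d : Nat) : List Char :=
  if cnt d % 2 = 1 then
    List.replicate (cnt d) (dChar d) ++ s.filter (fun x => decide (x ≠ dChar d))
  else s

theorem toNat_dChar {d : Nat} (h : d < 10) : (dChar d).toNat = 48 + d := by
  interval_cases d <;> decide

theorem dChar_inj {d e : Nat} (hd : d < 10) (he : e < 10) (h : dChar d = dChar e) : d = e := by
  have := congrArg Char.toNat h
  rw [toNat_dChar hd, toNat_dChar he] at this
  omega

theorem dChar_mem {d : Nat} (h : d < 10) : dChar d ∈ dList := by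
  interval_cases d <;> decide

theorem mem_dList {c : Char} : c ∈ dList ↔ ∃ d, d < 10 ∧ c = dChar d := by
  constructor
  · intro h
    simp only [dList, List.mem_cons, List.not_mem_nil, or_false] at h
    rcases h with rfl | rfl | rfl | rfl | rfl | rfl | rfl | rfl | rfl | rfl
    · exact ⟨0, by omega, by decide⟩
    · exact ⟨1, by omega, by decide⟩
    · exact ⟨2, by omega, by decide⟩
    · exact ⟨3, by omega, by decide⟩
    · exact ⟨4, by omega, by decide⟩
    · exact ⟨5, by omega, by decide⟩
    · exact ⟨6, by omega, by decide⟩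
    · exact ⟨7, by omega, by decide⟩
    · exact ⟨8, by omega, by decide⟩
    · exact ⟨9, by omega, by decide⟩
  · rintro ⟨d, hd, rfl⟩; exact dChar_mem hd

theorem bounds_iff_mem_dList {c : Char} : ('0' ≤ c ∧ c ≤ '9') ↔ c ∈ dList := by
  constructor
  · rintro ⟨h1, h2⟩
    rw [Char.le_def, UInt32.le_iff_toNat_le] at h1 h2
    have hc := Char.ofNat_toNat c
    have hd : c.toNat - 48 < 10 := by
      have : c.toNat ≤ 57 := h2
      omega
    have hrep : c = dChar (c.toNat - 48) := by
      have he : c.toNat = 48 + (c.toNat - 48) := by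
        have : 48 ≤ c.toNat := h1
        omega
      rw [← hc, he]
      generalize c.toNat - 48 = k at hd ⊢
      interval_cases k <;> decide
    rw [hrep]
    exact dChar_mem hd
  · intro h
    rw [mem_dList] at h
    obtain ⟨d, hd, rfl⟩ := h
    interval_cases d <;> exact ⟨by decide, by decide⟩

theorem guardA_eq {c : Char} :
    PySem.Chars.isIn [c] "0123456789".toList = decide (c ∈ dList) := by
  have hs : "0123456789".toList = dList := by decide
  rw [hs]
  by_cases h : c ∈ dList
  · simp only [h, decide_true]
    rw [PySem.Chars.isIn_iff_infix]
    obtain ⟨s, t, ht⟩ := List.append_of_mem h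
    exact ⟨s, t, by simp [ht]⟩
  · simp only [h, decide_false]
    rw [PySem.Chars.isIn_eq_false_iff]
    intro hin
    exact h (hin.sublist.mem (by simp))

theorem idxA_eq {c : Char} (h : c ∈ dList) :
    (PySem.Int.ofChars? [c]).getD 0 = (c.toNat : Int) - 48 := by
  simp only [dList, List.mem_cons, List.not_mem_nil, or_false] at h
  rcases h with rfl | rfl | rfl | rfl | rfl | rfl | rfl | rfl | rfl | rfl <;> decide

theorem set_map_range {β : Type} (n : Nat) (f : Nat → β) (k : Nat) (v : β) (hk : k < n) :
    ((List.range n).map f).set k v = (List.range n).map (fun d => if d = k then v else f d) := by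
  apply List.ext_getElem
  · simp
  · intro i hi₁ hi₂
    simp only [List.getElem_set, List.getElem_map, List.getElem_range]
    by_cases h : k = i
    · simp [h]
    · rw [if_neg h, if_neg (fun hh : i = k => h hh.symm)]

theorem cnt_fold_canon (cs : List Char) (f : Nat → Int) :
    cs.foldl cntStep ((List.range 10).map f)
      = (List.range 10).map (fun d => f d + (cntF cs d : Int)) := by
  induction cs generalizing f with
  | nil => simp [cntF]
  | cons c cs ih =>
    simp only [List.foldl_cons]
    by_cases hc : c ∈ dList
    · obtain ⟨d0, hd0, rfl⟩ := mem_dList.mp hc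
      have hidx : (((dChar d0).toNat : Int)) - 48 = ((d0 : Nat) : Int) := by
        rw [toNat_dChar hd0]; push_cast; ring
      have hstep : cntStep ((List.range 10).map f) (dChar d0)
          = (List.range 10).map (fun d => if d = d0 then f d0 + 1 else f d) := by
        unfold cntStep
        rw [if_pos hc, hidx, PySem.List.pySetD_natCast, PySem.List.pyGetD_natCast,
          PySem.List.getD_map_range f 10 d0 0 hd0, set_map_range 10 f d0 _ hd0]
      rw [hstep, ih]
      apply List.map_congr_left
      intro d hd
      simp only [List.mem_range] at hd
      by_cases hdd : d = d0
      · subst hdd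
        simp only [cntF, List.count_cons, beq_self_eq_true, if_true]
        push_cast; ring
      · have hne : (dChar d0 == dChar d) = false := by
          simp only [beq_eq_false_iff_ne, ne_eq]
          exact fun h => hdd (dChar_inj hd0 hd h).symm
        simp [if_neg hdd, cntF, List.count_cons, hne]
    · rw [show cntStep ((List.range 10).map f) c = (List.range 10).map f from if_neg hc, ih]
      apply List.map_congr_left
      intro d hd
      simp only [List.mem_range] at hd
      have hne : (c == dChar d) = false := by
        simp only [beq_eq_false_iff_ne, ne_eq]
        exact fun h => hc (h ▸ dChar_mem hd)
      simp [cntF, List.count_cons, hne]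

theorem replace_go_single (c : Char) :
    ∀ (fuel : Nat) (l acc : List Char), l.length ≤ fuel →
      PySem.Chars.replace.go [c] [] fuel l acc
        = acc.reverse ++ l.filter (fun x => decide (x ≠ c)) := by
  intro fuel
  induction fuel with
  | zero =>
    intro l acc h
    have : l = [] := List.eq_nil_of_length_eq_zero (by omega)
    subst this
    simp [PySem.Chars.replace.go]
  | succ fuel ih =>
    intro l acc h
    cases l with
    | nil => simp [PySem.Chars.replace.go]
    | cons x t =>
      by_cases hx : x = c
      · subst hx
        have hpre : List.isPrefixOf [x] (x :: t) = true := by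
          simp [List.isPrefixOf]
        simp only [PySem.Chars.replace.go, hpre, if_pos]
        have hdrop : List.drop [x].length (x :: t) = t := by simp
        rw [hdrop, ih t _ (by simpa using h)]
        simp
      · have hpre : List.isPrefixOf [c] (x :: t) = false := by
          simp [List.isPrefixOf]
          exact fun h => hx h.symm
        simp only [PySem.Chars.replace.go, hpre, Bool.false_eq_true]
        rw [ih t (x :: acc) (by simpa using h)]
        simp [hx]

theorem replace_single (c : Char) (l : List Char) :
    PySem.Chars.replace l [c] [] = l.filter (fun x => decide (x ≠ c)) := by
  unfold PySem.Chars.replace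
  simp only [List.isEmpty_cons, Bool.false_eq_true]
  rw [replace_go_single c l.length l [] (le_refl _)]
  simp

theorem join_nil_eq_flatten (parts : List (List Char)) :
    PySem.Chars.join [] parts = parts.flatten := by
  unfold PySem.Chars.join
  induction parts with
  | nil => simp [List.intercalate]
  | cons a t ih =>
    cases t with
    | nil => simp [List.intercalate]
    | cons b t' =>
      simp only [List.intercalate, List.intersperse] at ih ⊢
      simp_all

theorem loopA (cnt : Nat → Nat) :
    ∀ (ds : List Nat), ds.Pairwise (· > ·) → (∀ d ∈ ds, d < 10) → ∀ s,
      ds.foldl (stepA cnt) s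
        = (ds.reverse.filter (fun d => decide (cnt d % 2 = 1))).flatMap
            (fun d => List.replicate (cnt d) (dChar d))
          ++ s.filter (fun x => decide (∀ d ∈ ds, cnt d % 2 = 1 → x ≠ dChar d)) := by
  intro ds
  induction ds with
  | nil => intro _ _ s; simp
  | cons d ds ih =>
    intro hp hlt s
    obtain ⟨hgt, hp'⟩ := List.pairwise_cons.mp hp
    have hd10 : d < 10 := hlt d (by simp)
    simp only [List.foldl_cons]
    rw [ih hp' (fun e he => hlt e (by simp [he])) (stepA cnt s d)]
    unfold stepA
    by_cases hodd : cnt d % 2 = 1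
    · rw [if_pos hodd, List.filter_append]
      have hrep : (List.replicate (cnt d) (dChar d)).filter
          (fun x => decide (∀ e ∈ ds, cnt e % 2 = 1 → x ≠ dChar e))
          = List.replicate (cnt d) (dChar d) := by
        apply List.filter_eq_self.mpr
        intro a ha
        have ha' := List.eq_of_mem_replicate ha
        subst ha'
        simp only [decide_eq_true_eq]
        intro e he _
        have hed : e < d := hgt e he
        intro h
        exact absurd (dChar_inj hd10 (hlt e (by simp [he])) h) (by omega)
      have hfil : (s.filter (fun x => decide (x ≠ dChar d))).filter
          (fun x => decide (∀ e ∈ ds, cnt e % 2 = 1 → x ≠ dChar e))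
          = s.filter (fun x => decide (∀ e ∈ d :: ds, cnt e % 2 = 1 → x ≠ dChar e)) := by
        rw [List.filter_filter]
        apply List.filter_congr
        intro x _
        simp only [List.forall_mem_cons, hodd, forall_const, Bool.decide_and]
        rw [Bool.and_comm]
      rw [hrep, hfil]
      have hblocks : ((d :: ds).reverse.filter (fun e => decide (cnt e % 2 = 1))).flatMap
            (fun e => List.replicate (cnt e) (dChar e))
          = (ds.reverse.filter (fun e => decide (cnt e % 2 = 1))).flatMap
              (fun e => List.replicate (cnt e) (dChar e)) ++ List.replicate (cnt d) (dChar d) := by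
        simp [List.filter_append, hodd]
      rw [hblocks, List.append_assoc]
    · rw [if_neg hodd]
      have hpred : s.filter (fun x => decide (∀ e ∈ ds, cnt e % 2 = 1 → x ≠ dChar e))
          = s.filter (fun x => decide (∀ e ∈ d :: ds, cnt e % 2 = 1 → x ≠ dChar e)) := by
        apply List.filter_congr
        intro x _
        simp [hodd]
      have hblocks : ((d :: ds).reverse.filter (fun e => decide (cnt e % 2 = 1))).flatMap
            (fun e => List.replicate (cnt e) (dChar e))
          = (ds.reverse.filter (fun e => decide (cnt e % 2 = 1))).flatMap
              (fun e => List.replicate (cnt e) (dChar e)) := by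
        simp [List.filter_append, hodd]
      rw [hpred, hblocks]

theorem mem_desc (d : Nat) : d ∈ [9, 8, 7, 6, 5, 4, 3, 2, 1, 0] ↔ d < 10 := by
  simp only [List.mem_cons, List.not_mem_nil, or_false]
  omega

theorem beq_one_natCast (n : Nat) : (((n : Int)) == 1) = decide (n = 1) := by
  by_cases h : n = 1 <;> simp [h]

theorem getL (cnt : Nat → Nat) {d : Nat} (hd : d < 10) :
    PySem.List.pyGetD ((List.range 10).map (fun e => (cnt e : Int))) ((d : Nat) : Int) 0
      = ((cnt d : Nat) : Int) := by
  rw [PySem.List.pyGetD_natCast]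
  exact PySem.List.getD_map_range _ 10 d 0 hd

theorem toChars_digit {d : Nat} (hd : d < 10) :
    PySem.Int.toChars ((d : Nat) : Int) = [dChar d] := by
  interval_cases d <;> decide

theorem chr_digit {d : Nat} (hd : d < 10) :
    Char.ofNat ((48 + ((d : Nat) : Int)).toNat) = dChar d := by
  interval_cases d <;> decide

theorem countA (cs : List Char) :
    cs.foldl (fun l i =>
      if PySem.Chars.isIn [i] "0123456789".toList then
        PySem.List.pySetD l ((PySem.Int.ofChars? [i]).getD 0)
          (PySem.List.pyGetD l ((PySem.Int.ofChars? [i]).getD 0) 0 + 1)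
      else l) (List.replicate 10 (0 : Int))
    = (List.range 10).map (fun d => (cntF cs d : Int)) := by
  have hA : ∀ (acc : List Int), ∀ x ∈ cs,
      (if PySem.Chars.isIn [x] "0123456789".toList then
        PySem.List.pySetD acc ((PySem.Int.ofChars? [x]).getD 0)
          (PySem.List.pyGetD acc ((PySem.Int.ofChars? [x]).getD 0) 0 + 1)
      else acc) = cntStep acc x := by
    intro acc x _
    rw [guardA_eq]
    by_cases hx : x ∈ dList
    · simp [cntStep, hx, idxA_eq hx]
    · simp [cntStep, hx]
  rw [show (List.replicate 10 (0 : Int)) = (List.range 10).map (fun _ => (0 : Int)) from by decide]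
  rw [PySem.List.foldl_congr_mem cs _ cntStep _ hA, cnt_fold_canon]
  simp

theorem countB (cs : List Char) :
    cs.foldl (fun cnt ch =>
      if decide ('0' ≤ ch ∧ ch ≤ '9') then
        PySem.List.pySetD cnt ((ch.toNat : Int) - 48)
          (PySem.List.pyGetD cnt ((ch.toNat : Int) - 48) 0 + 1)
      else cnt) (List.replicate 10 (0 : Int))
    = (List.range 10).map (fun d => (cntF cs d : Int)) := by
  have hB : ∀ (acc : List Int), ∀ x ∈ cs,
      (if decide ('0' ≤ x ∧ x ≤ '9') then
        PySem.List.pySetD acc ((x.toNat : Int) - 48)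
          (PySem.List.pyGetD acc ((x.toNat : Int) - 48) 0 + 1)
      else acc) = cntStep acc x := by
    intro acc x _
    by_cases hx : x ∈ dList
    · have hb : ('0' ≤ x ∧ x ≤ '9') := bounds_iff_mem_dList.mpr hx
      simp [cntStep, hx, hb]
    · have hb : ¬ ('0' ≤ x ∧ x ≤ '9') := fun h => hx (bounds_iff_mem_dList.mp h)
      simp [cntStep, hx, hb]
  rw [show (List.replicate 10 (0 : Int)) = (List.range 10).map (fun _ => (0 : Int)) from by decide]
  rw [PySem.List.foldl_congr_mem cs _ cntStep _ hB, cnt_fold_canon]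
  simp

theorem Aloop (cnt : Nat → Nat) (s : List Char) :
    (PySem.List.pyRange 9 (-1) (-1)).foldl (fun s i =>
      if PySem.Int.mod (PySem.List.pyGetD ((List.range 10).map (fun e => (cnt e : Int))) i 0) 2 == 1 then
        PySem.List.pyRepeat (PySem.Int.toChars i)
            (PySem.List.pyGetD ((List.range 10).map (fun e => (cnt e : Int))) i 0)
          ++ PySem.Chars.replace s (PySem.Int.toChars i) []
      else s) s
    = ((List.range 10).filter (fun d => decide (cnt d % 2 = 1))).flatMap
        (fun d => List.replicate (cnt d) (dChar d))
      ++ s.filter (fun x => decide (∀ d ∈ List.range 10, cnt d % 2 = 1 → x ≠ dChar d)) := by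
  rw [show PySem.List.pyRange 9 (-1) (-1)
      = ([9, 8, 7, 6, 5, 4, 3, 2, 1, 0] : List Nat).map (fun d : Nat => (d : Int)) from by decide]
  rw [List.foldl_map]
  refine (PySem.List.foldl_congr_mem ([9, 8, 7, 6, 5, 4, 3, 2, 1, 0] : List Nat) _
      (stepA cnt) s ?_).trans ?_
  · intro acc d hd
    have hd10 : d < 10 := (mem_desc d).mp hd
    show (if PySem.Int.mod (PySem.List.pyGetD ((List.range 10).map (fun e => (cnt e : Int))) ((d : Nat) : Int) 0) 2 == 1 then
        PySem.List.pyRepeat (PySem.Int.toChars ((d : Nat) : Int))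
            (PySem.List.pyGetD ((List.range 10).map (fun e => (cnt e : Int))) ((d : Nat) : Int) 0)
          ++ PySem.Chars.replace acc (PySem.Int.toChars ((d : Nat) : Int)) []
      else acc) = stepA cnt acc d
    have h2 : PySem.Int.mod (((cnt d : Nat) : Int)) 2 = (((cnt d % 2 : Nat) : Nat) : Int) := by
      exact_mod_cast PySem.Int.mod_natCast (cnt d) 2
    rw [getL cnt hd10, h2, beq_one_natCast, toChars_digit hd10,
      PySem.List.pyRepeat_singleton, Int.toNat_natCast, replace_single]
    unfold stepA
    by_cases hodd : cnt d % 2 = 1 <;> simp [hodd]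
  rw [loopA cnt [9, 8, 7, 6, 5, 4, 3, 2, 1, 0] (by decide) (fun d hd => (mem_desc d).mp hd) s]
  congr 1
  apply List.filter_congr
  intro x _
  exact decide_eq_decide.mpr
    ⟨fun h d hd ho => h d ((mem_desc d).mpr (List.mem_range.mp hd)) ho,
     fun h d hd ho => h d (List.mem_range.mpr ((mem_desc d).mp hd)) ho⟩

theorem oddInts_eq (cnt : Nat → Nat) :
    ((List.range 10).map (fun d : Nat => (d : Int))).filter
        (fun d => PySem.Int.mod (PySem.List.pyGetD ((List.range 10).map (fun e => (cnt e : Int))) d 0) 2 == 1)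
      = ((List.range 10).filter (fun d => decide (cnt d % 2 = 1))).map (fun d : Nat => (d : Int)) := by
  rw [List.filter_map]
  congr 1
  apply List.filter_congr
  intro d hd
  have hd10 := List.mem_range.mp hd
  simp only [Function.comp]
  have h2 : PySem.Int.mod (((cnt d : Nat) : Int)) 2 = (((cnt d % 2 : Nat) : Nat) : Int) := by
    exact_mod_cast PySem.Int.mod_natCast (cnt d) 2
  rw [getL cnt hd10, h2, beq_one_natCast]

theorem Bpre (cnt : Nat → Nat) :
    PySem.Chars.join []
      (((PySem.List.pyRange 0 10 1).filter
          (fun d => PySem.Int.mod (PySem.List.pyGetD ((List.range 10).map (fun e => (cnt e : Int))) d 0) 2 == 1)).map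
        (fun d => PySem.List.pyRepeat [Char.ofNat (48 + d).toNat]
          (PySem.List.pyGetD ((List.range 10).map (fun e => (cnt e : Int))) d 0)))
    = ((List.range 10).filter (fun d => decide (cnt d % 2 = 1))).flatMap
        (fun d => List.replicate (cnt d) (dChar d)) := by
  rw [show PySem.List.pyRange 0 10 1 = (List.range 10).map (fun d : Nat => (d : Int)) from by decide]
  rw [oddInts_eq, List.map_map]
  have hblk : ∀ d ∈ (List.range 10).filter (fun d => decide (cnt d % 2 = 1)),
      ((fun d => PySem.List.pyRepeat [Char.ofNat (48 + d).toNat]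
          (PySem.List.pyGetD ((List.range 10).map (fun e => (cnt e : Int))) d 0))
        ∘ (fun d : Nat => (d : Int))) d = List.replicate (cnt d) (dChar d) := by
    intro d hd
    have hd10 := List.mem_range.mp (List.mem_filter.mp hd).1
    simp only [Function.comp]
    rw [getL cnt hd10, chr_digit hd10, PySem.List.pyRepeat_singleton, Int.toNat_natCast]
  rw [List.map_congr_left hblk, join_nil_eq_flatten, ← List.flatMap_def]

theorem Btail (cnt : Nat → Nat) (cs : List Char) :
    cs.filter (fun ch => !(PySem.Set.contains (PySem.Set.ofList
        (((PySem.List.pyRange 0 10 1).filter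
            (fun d => PySem.Int.mod (PySem.List.pyGetD ((List.range 10).map (fun e => (cnt e : Int))) d 0) 2 == 1)).map
          (fun d => Char.ofNat (48 + d).toNat))) ch))
    = cs.filter (fun x => decide (∀ d ∈ List.range 10, cnt d % 2 = 1 → x ≠ dChar d)) := by
  rw [show PySem.List.pyRange 0 10 1 = (List.range 10).map (fun d : Nat => (d : Int)) from by decide]
  rw [oddInts_eq, List.map_map]
  have hchr : ∀ d ∈ (List.range 10).filter (fun d => decide (cnt d % 2 = 1)),
      ((fun d => Char.ofNat (48 + d).toNat) ∘ (fun d : Nat => (d : Int))) d = dChar d := by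
    intro d hd
    have hd10 := List.mem_range.mp (List.mem_filter.mp hd).1
    simp only [Function.comp]
    exact chr_digit hd10
  rw [List.map_congr_left hchr]
  apply List.filter_congr
  intro x _
  by_cases hx : x ∈ ((List.range 10).filter (fun d => decide (cnt d % 2 = 1))).map dChar
  · have hcont : PySem.Set.contains (PySem.Set.ofList
        (((List.range 10).filter (fun d => decide (cnt d % 2 = 1))).map dChar)) x = true := by
      simp [PySem.Set.contains, PySem.Set.mem_ofList, hx]
    rw [hcont]
    obtain ⟨d, hdm, hdx⟩ := List.mem_map.mp hx
    obtain ⟨hdr, hdo⟩ := List.mem_filter.mp hdm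
    have hd10 := List.mem_range.mp hdr
    have hodd : cnt d % 2 = 1 := of_decide_eq_true hdo
    simp only [Bool.not_true]
    refine (decide_eq_false ?_).symm
    intro hall
    exact hall d (List.mem_range.mpr hd10) hodd hdx.symm
  · have hcont : PySem.Set.contains (PySem.Set.ofList
        (((List.range 10).filter (fun d => decide (cnt d % 2 = 1))).map dChar)) x = false := by
      simp [PySem.Set.contains, PySem.Set.mem_ofList, hx]
    rw [hcont]
    simp only [Bool.not_false]
    refine (decide_eq_true ?_).symm
    intro e he ho hxe
    exact hx (List.mem_map.mpr
      ⟨e, List.mem_filter.mpr ⟨he, decide_eq_true ho⟩, hxe.symm⟩)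

-- ===== VERDICT (by name: the statement is the Claim_ definition above) =====
theorem sortings_spec : Claim_equal_sortings := by
  intro inpt _
  unfold Spec_sortings sortings sortings_alt
  simp only [countA, countB]
  rw [Aloop (cntF inpt.toList) inpt.toList, Bpre (cntF inpt.toList), Btail (cntF inpt.toList) inpt.toList]
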